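-- pv_equiv track=rewrite | github.com/project-sunbird/sunbird-ml-workbench | src/main/python/daggit/contrib/ekstep/operators/contentTaggingUtils.py | WordtoPhraseMatch
-- ===== SOURCE A (Python) =====
-- def WordtoPhraseMatch(wordlist, phraselist, DELIMITTER):
--     phrasewords = [item.split(DELIMITTER) for item in phraselist]
--     match_count = 0
--     partial_match_list = []
--     wordlist_dynamic = wordlist[:]
--     for items in phrasewords:
--         word_count = 0
--         wordlist = wordlist_dynamic[:]
--         for word in wordlist:
--             if word in items:
--                 word_count += 1
--                 partial_match_list.append((word, '_'.join(items)))
--                 wordlist_dynamic.remove(word)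
--         match_count += int(bool(word_count))
--     return partial_match_list, match_count
-- ===== SOURCE B (Python) =====
-- def WordtoPhraseMatch(wordlist, phraselist, DELIMITTER):
--     # index pass: first phrase owning each word value, plus the joined phrase strings
--     owner = {}
--     joined = []
--     for i, item in enumerate(phraselist):
--         words = item.split(DELIMITTER)
--         joined.append('_'.join(words))
--         for w in words:
--             owner.setdefault(w, i)
--     # one distributing pass over wordlist into per-phrase buckets
--     buckets = [[] for _ in phraselist]
--     for w in wordlist:
--         i = owner.get(w)
--         if i is not None:
--             buckets[i].append((w, joined[i]))
--     partial_match_list = [pair for bucket in buckets for pair in bucket]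
--     match_count = sum(1 for bucket in buckets if bucket)
--     return partial_match_list, match_count
-- ===== Notes on version B (the rewrite author's own statement) =====
-- stated objective: faster
-- what changed: Replaces A's per-phrase snapshot-scan-and-remove loops (a fresh copy of the shrinking word list per phrase, with list.remove inside the scan) by a precomputed first-owner index over the phrase words followed by a single distributing pass over wordlist into per-phrase buckets, concatenated in phrase order.
import Mathlib
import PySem

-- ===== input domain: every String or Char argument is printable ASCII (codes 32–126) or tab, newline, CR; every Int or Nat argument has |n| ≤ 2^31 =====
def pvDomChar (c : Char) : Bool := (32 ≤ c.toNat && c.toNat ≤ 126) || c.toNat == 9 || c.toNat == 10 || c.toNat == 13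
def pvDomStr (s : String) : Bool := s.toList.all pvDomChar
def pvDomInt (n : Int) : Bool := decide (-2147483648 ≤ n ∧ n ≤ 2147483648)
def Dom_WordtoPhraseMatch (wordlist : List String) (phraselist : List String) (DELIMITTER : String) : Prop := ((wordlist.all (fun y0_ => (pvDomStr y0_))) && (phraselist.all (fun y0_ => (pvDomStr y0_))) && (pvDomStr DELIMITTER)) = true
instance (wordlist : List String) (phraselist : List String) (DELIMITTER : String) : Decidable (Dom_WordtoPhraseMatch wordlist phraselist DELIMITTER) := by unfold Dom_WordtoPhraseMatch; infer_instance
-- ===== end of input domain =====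

-- B replaces A's per-phrase snapshot-scan-and-remove loops by a first-owner index over the
-- phrase words plus one distributing pass over wordlist into per-phrase buckets (measured
-- faster in a timing run); return values proved equal whenever A returns.


-- ===== PORT A =====
-- item.split(DELIMITTER): PySem.Str.split? is none only for DELIMITTER = "" (Python raises
-- ValueError there; excluded by Pre_), so the .getD [] default is never taken under Pre_.
def pvSplit (DELIMITTER : String) (item : String) : List String :=
  (PySem.Str.split? item DELIMITTER).getD []

-- inner 'for word in wordlist' body; state = (word_count, partial_match_list, wordlist_dynamic).
-- wordlist_dynamic.remove(word) never raises here (word is in the snapshot of wordlist_dynamic),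
-- so the .getD st.2.2 default is never taken.
def pvInnerStep (items : List String) (st : Int × List (String × String) × List String)
    (word : String) : Int × List (String × String) × List String :=
  if word ∈ items then
    (st.1 + 1, st.2.1 ++ [(word, PySem.Str.join "_" items)],
     (PySem.List.remove? st.2.2 word).getD st.2.2)
  else st

-- outer 'for items in phrasewords' body; state = (match_count, partial_match_list, wordlist_dynamic)
def pvOuterStep (st : Int × List (String × String) × List String) (items : List String) :
    Int × List (String × String) × List String :=
  let inner := st.2.2.foldl (pvInnerStep items) (0, st.2.1, st.2.2)
  (st.1 + (if inner.1 == 0 then 0 else 1), inner.2.1, inner.2.2)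

def WordtoPhraseMatch (wordlist : List String) (phraselist : List String) (DELIMITTER : String) :
    (List (String × String)) × Int :=
  let phrasewords := phraselist.map (pvSplit DELIMITTER)
  let res := phrasewords.foldl pvOuterStep (0, [], wordlist)
  (res.2.1, res.1)

-- ===== PORT B =====
-- first pass of Source B: owner = first phrase index owning each word value (dict.setdefault),
-- joined = the '_'-joined phrase strings, built over enumerate(phraselist)
def pvOwnerJoined (phraselist : List String) (DELIMITTER : String) :
    PySem.Dict String Int × List String :=
  (PySem.List.enumerate phraselist).foldl
    (fun st p =>
      let words := pvSplit DELIMITTER p.2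
      (words.foldl (fun d w => d.setdefault w p.1) st.1,
       st.2 ++ [PySem.Str.join "_" words]))
    (PySem.Dict.empty, [])

-- second pass of Source B: distribute each word of wordlist into its owner's bucket
def pvBucketStep (owner : PySem.Dict String Int) (joined : List String)
    (bs : List (List (String × String))) (w : String) : List (List (String × String)) :=
  match owner.get? w with
  | some i => PySem.List.pySetD bs i
      (PySem.List.pyGetD bs i [] ++ [(w, PySem.List.pyGetD joined i "")])
  | none => bs

def WordtoPhraseMatch_alt (wordlist : List String) (phraselist : List String)
    (DELIMITTER : String) : (List (String × String)) × Int :=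
  let oj := pvOwnerJoined phraselist DELIMITTER
  let buckets := wordlist.foldl (pvBucketStep oj.1 oj.2) (phraselist.map (fun _ => []))
  (buckets.flatten, (buckets.countP (fun b => !b.isEmpty) : Int))

-- ===== PRECONDITION & SPEC =====
-- Pre_ excludes only DELIMITTER = "" with a nonempty phraselist, where Python's str.split('')
-- raises ValueError in A (and in B alike).
def Pre_WordtoPhraseMatch (wordlist : List String) (phraselist : List String)
    (DELIMITTER : String) : Prop := phraselist = [] ∨ DELIMITTER ≠ ""
instance (wordlist : List String) (phraselist : List String) (DELIMITTER : String) :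
    Decidable (Pre_WordtoPhraseMatch wordlist phraselist DELIMITTER) := by
  unfold Pre_WordtoPhraseMatch; infer_instance

def pvWitness_WordtoPhraseMatch : List String × List String × String :=
  (["a", "b", "c"], ["a_b", "c"], "_")

def Spec_WordtoPhraseMatch (wordlist : List String) (phraselist : List String)
    (DELIMITTER : String) (out : (List (String × String)) × Int) : Prop :=
  out = WordtoPhraseMatch_alt wordlist phraselist DELIMITTER
instance (wordlist : List String) (phraselist : List String) (DELIMITTER : String)
    (out : (List (String × String)) × Int) :
    Decidable (Spec_WordtoPhraseMatch wordlist phraselist DELIMITTER out) := by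
  unfold Spec_WordtoPhraseMatch; infer_instance

-- ===== CLAIM (what is proved, stated in full; the proofs are below) =====
def Claim_equal_WordtoPhraseMatch : Prop := ∀ (wordlist : List String) (phraselist : List String) (DELIMITTER : String), Dom_WordtoPhraseMatch wordlist phraselist DELIMITTER → Pre_WordtoPhraseMatch wordlist phraselist DELIMITTER → Spec_WordtoPhraseMatch wordlist phraselist DELIMITTER (WordtoPhraseMatch wordlist phraselist DELIMITTER)

-- ===== LEMMAS AND PROOFS =====

-- the common specification both ports are reduced to: per-phrase buckets, where phrase i gets
-- (in wordlist order) the words not claimed by any earlier phrase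
def specBuckets : List (List String) → List String → List (List (String × String))
  | [], _ => []
  | items :: rest, wl =>
      ((wl.filter (fun w => decide (w ∈ items))).map (fun w => (w, PySem.Str.join "_" items)))
        :: specBuckets rest (wl.filter (fun w => !decide (w ∈ items)))

-- index of the first phrase whose split words contain w
def leastIdx : List (List String) → String → Option Int
  | [], _ => none
  | items :: rest, w => if w ∈ items then some 0 else (leastIdx rest w).map (· + 1)

theorem remove_pref (pref rest : List String) (w : String)
    (h : ∀ x ∈ pref, x ≠ w) :
    PySem.List.remove? (pref ++ w :: rest) w = some (pref ++ rest) := by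
  induction pref with
  | nil => simp [PySem.List.remove?_cons_self]
  | cons x xs ih =>
    have hx : x ≠ w := h x (by simp)
    rw [List.cons_append, PySem.List.remove?_cons_of_ne _ hx,
        ih (fun y hy => h y (by simp [hy]))]
    rfl

theorem innerLoop (items : List String) (ws pref : List String)
    (pml : List (String × String)) (c : Int)
    (hpref : ∀ x ∈ pref, x ∉ items) :
    ws.foldl (pvInnerStep items) (c, pml, pref ++ ws)
      = (c + (ws.countP (fun w => decide (w ∈ items)) : Int),
         pml ++ (ws.filter (fun w => decide (w ∈ items))).map
             (fun w => (w, PySem.Str.join "_" items)),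
         pref ++ ws.filter (fun w => !decide (w ∈ items))) := by
  induction ws generalizing pref pml c with
  | nil => simp
  | cons w ws ih =>
    by_cases hw : w ∈ items
    · have hrm : PySem.List.remove? (pref ++ w :: ws) w = some (pref ++ ws) :=
        remove_pref pref ws w (fun x hx hxw => hpref x hx (hxw ▸ hw))
      simp only [List.foldl_cons, pvInnerStep, if_pos hw, hrm, Option.getD_some]
      rw [ih pref _ _ hpref]
      simp [hw, List.countP_cons]
      omega
    · have : pref ++ w :: ws = (pref ++ [w]) ++ ws := by simp
      have hpref' : ∀ x ∈ pref ++ [w], x ∉ items := by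
        intro x hx
        rcases List.mem_append.1 hx with h | h
        · exact hpref x h
        · simp at h; simpa [h] using hw
      simp only [List.foldl_cons, pvInnerStep, if_neg hw, this]
      rw [ih (pref ++ [w]) _ _ hpref']
      simp [hw, List.countP_cons]

theorem outerLoop (pw : List (List String)) (wl : List String)
    (c : Int) (pml : List (String × String)) :
    (pw.foldl pvOuterStep (c, pml, wl)).1
        = c + (((specBuckets pw wl).countP (fun b => !b.isEmpty)) : Int) ∧
    (pw.foldl pvOuterStep (c, pml, wl)).2.1 = pml ++ (specBuckets pw wl).flatten := by
  induction pw generalizing wl c pml with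
  | nil => simp [specBuckets]
  | cons items rest ih =>
    have hinner := innerLoop items wl [] pml 0 (by simp)
    simp only [List.nil_append] at hinner
    simp only [List.foldl_cons, pvOuterStep, hinner]
    have hcnt : (((0 : Int) + (wl.countP (fun w => decide (w ∈ items)) : Int)) == 0)
        = (wl.filter (fun w => decide (w ∈ items))).isEmpty := by
      rw [List.countP_eq_length_filter]
      rcases List.filter (fun w => decide (w ∈ items)) wl with _ | ⟨x, xs⟩ <;> simp <;> omega
    rcases ih (wl.filter (fun w => !decide (w ∈ items)))
        (c + if (((0:Int) + (wl.countP (fun w => decide (w ∈ items)) : Int)) == 0) then 0 else 1)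
        (pml ++ (wl.filter (fun w => decide (w ∈ items))).map
            (fun w => (w, PySem.Str.join "_" items))) with ⟨h1, h2⟩
    refine ⟨?_, ?_⟩
    · rw [h1, hcnt]
      by_cases hb : List.filter (fun w => decide (w ∈ items)) wl = []
      · simp [specBuckets, List.countP_cons, hb]
      · simp only [specBuckets, List.countP_cons, hb, List.isEmpty_iff, if_neg hb,
          List.map_eq_nil_iff, Bool.not_eq_true']
        simp [hb]
        push_cast
        ring
    · rw [h2]
      simp [specBuckets]

theorem get?_mk_append_singleton {κ ν : Type} [BEq κ] (l : List (κ × ν)) (k x : κ) (v : ν) :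
    (PySem.Dict.mk (l ++ [(k, v)])).get? x
      = ((PySem.Dict.mk l).get? x).or (if k == x then some v else none) := by
  induction l with
  | nil => simp [PySem.Dict.get?_mk_cons]; rcases h : k == x <;> simp [PySem.Dict.get?]
  | cons p rest ih =>
    rw [List.cons_append, PySem.Dict.get?_mk_cons, PySem.Dict.get?_mk_cons, ih]
    split <;> simp

theorem get?_setdefault {κ ν : Type} [BEq κ] [LawfulBEq κ] (d : PySem.Dict κ ν) (k x : κ) (v : ν) :
    (d.setdefault k v).get? x = (d.get? x).or (if k == x then some v else none) := by
  rw [PySem.Dict.setdefault]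
  split
  · rename_i hc
    rcases hx : k == x with _ | _
    · simp
    · have hkx : k = x := eq_of_beq hx
      subst hkx
      rw [PySem.Dict.contains_eq_isSome_get?] at hc
      cases h : d.get? k with
      | some w => simp
      | none => rw [h] at hc; simp at hc
  · rename_i hc
    cases d with | mk items => exact get?_mk_append_singleton items k x v

theorem setfold_get? (i : Int) (w : String) (ws : List String) (d : PySem.Dict String Int) :
    (ws.foldl (fun d x => d.setdefault x i) d).get? w
      = (d.get? w).or (if w ∈ ws then some i else none) := by
  induction ws generalizing d with
  | nil => simp
  | cons x ws ih =>
    rw [List.foldl_cons, ih, get?_setdefault]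
    by_cases hxw : x = w
    · subst hxw
      rcases h : d.get? x with _ | v <;> simp [h, Option.or_assoc]
    · have hbx : (x == w) = false := by simp [hxw]
      simp [hbx, List.mem_cons, Ne.symm hxw]

theorem owner_aux (DELIMITTER : String) (w : String) (pl : List String) :
    ∀ (s : Int) (d : PySem.Dict String Int) (js : List String),
    (((PySem.List.enumerate pl s).foldl
      (fun st p =>
        let words := pvSplit DELIMITTER p.2
        (words.foldl (fun d w => d.setdefault w p.1) st.1,
         st.2 ++ [PySem.Str.join "_" words])) (d, js)).1).get? w
      = (d.get? w).or ((leastIdx (pl.map (pvSplit DELIMITTER)) w).map (· + s)) := by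
  induction pl with
  | nil => intro s d js; simp [leastIdx]
  | cons item rest ih =>
    intro s d js
    rw [PySem.List.enumerate_cons, List.foldl_cons]
    simp only []
    rw [ih (s + 1)]
    rw [setfold_get?, Option.or_assoc]
    congr 1
    simp only [List.map_cons, leastIdx]
    by_cases hw : w ∈ pvSplit DELIMITTER item
    · simp [hw]; try omega
    · cases h : leastIdx (rest.map (pvSplit DELIMITTER)) w <;> simp [hw, h] <;> try ring

theorem joined_aux (DELIMITTER : String) (pl : List String) :
    ∀ (s : Int) (d : PySem.Dict String Int) (js : List String),
    ((PySem.List.enumerate pl s).foldl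
      (fun st p =>
        let words := pvSplit DELIMITTER p.2
        (words.foldl (fun d w => d.setdefault w p.1) st.1,
         st.2 ++ [PySem.Str.join "_" words])) (d, js)).2
      = js ++ (pl.map (pvSplit DELIMITTER)).map (fun items => PySem.Str.join "_" items) := by
  induction pl with
  | nil => intro s d js; simp
  | cons item rest ih =>
    intro s d js
    rw [PySem.List.enumerate_cons, List.foldl_cons]
    simp only []
    rw [ih (s + 1)]
    simp

theorem owner_spec (phraselist : List String) (DELIMITTER : String) (w : String) :
    (pvOwnerJoined phraselist DELIMITTER).1.get? w
      = leastIdx (phraselist.map (pvSplit DELIMITTER)) w := by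
  rw [pvOwnerJoined, owner_aux]
  cases h : leastIdx (phraselist.map (pvSplit DELIMITTER)) w <;> simp

theorem joined_spec (phraselist : List String) (DELIMITTER : String) :
    (pvOwnerJoined phraselist DELIMITTER).2
      = (phraselist.map (pvSplit DELIMITTER)).map (fun items => PySem.Str.join "_" items) := by
  rw [pvOwnerJoined, joined_aux]
  simp

theorem pySetD_eq_set {α : Type} (xs : List α) (i : Int) (v : α)
    (h0 : 0 ≤ i) (h1 : i < xs.length) :
    PySem.List.pySetD xs i v = xs.set i.toNat v := by
  have : PySem.List.pyIdx? xs.length i = some i.toNat := by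
    unfold PySem.List.pyIdx?
    rw [if_pos h0, if_pos (by exact_mod_cast h1)]
  simp [PySem.List.pySetD, PySem.List.pySet?, this]

theorem bucketLoop (owner : PySem.Dict String Int) (joined : List String)
    (wl : List String) (bs : List (List (String × String)))
    (hrange : ∀ w i, owner.get? w = some i → 0 ≤ i ∧ i < bs.length) :
    wl.foldl (pvBucketStep owner joined) bs
      = bs.mapIdx (fun i b => b ++ ((wl.filter
            (fun w => owner.get? w == some (i : Int))).map
            (fun w => (w, PySem.List.pyGetD joined (i : Int) "")))) := by
  induction wl generalizing bs with
  | nil =>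
    apply List.ext_getElem <;> simp
  | cons w wl ih =>
    rw [List.foldl_cons]
    cases ho : owner.get? w with
    | none =>
      rw [show pvBucketStep owner joined bs w = bs by simp [pvBucketStep, ho], ih bs hrange]
      apply List.ext_getElem
      · simp
      · intro j hj1 hj2
        simp only [List.getElem_mapIdx]
        congr 2
        simp [List.filter_cons, ho]
    | some i =>
      obtain ⟨hi0, hilt⟩ := hrange w i ho
      have hset : pvBucketStep owner joined bs w
          = bs.set i.toNat (bs[i.toNat]'(by omega) ++ [(w, PySem.List.pyGetD joined i "")]) := by
        simp only [pvBucketStep, ho]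
        rw [pySetD_eq_set _ _ _ hi0 (by exact_mod_cast hilt),
            PySem.List.pyGetD_eq_getElem _ _ hi0 (by exact_mod_cast hilt)]
      rw [hset, ih _ (by simpa using hrange)]
      apply List.ext_getElem
      · simp
      · intro j hj1 hj2
        simp only [List.getElem_mapIdx, List.getElem_set]
        by_cases hji : j = i.toNat
        · have hcast : ((j : Nat) : Int) = i := by omega
          subst hji
          simp only [if_pos rfl, List.filter_cons, hcast, ho]
          simp [List.append_assoc, hcast]
        · have hne : ¬ (owner.get? w == some ((j : Nat) : Int)) = true := by
            simp [ho]; omega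
          simp only [if_neg hji, List.filter_cons]
          simp [hne]
          intro hh
          exact absurd hh.symm hji

theorem leastIdx_nonneg (pw : List (List String)) (w : String) (i : Int)
    (h : leastIdx pw w = some i) : 0 ≤ i := by
  induction pw generalizing i with
  | nil => simp [leastIdx] at h
  | cons items rest ih =>
    simp only [leastIdx] at h
    split at h
    · simp at h ⊢; omega
    · cases hr : leastIdx rest w with
      | none => rw [hr] at h; simp at h
      | some j => rw [hr] at h; simp at h; have := ih j hr; omega

theorem least_cons_zero (items : List String) (rest : List (List String)) (w : String) :
    (leastIdx (items :: rest) w == some 0) = decide (w ∈ items) := by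
  by_cases hw : w ∈ items
  · simp [leastIdx, hw]
  · simp only [leastIdx, if_neg hw]
    cases hr : leastIdx rest w with
    | none => simp [hw]
    | some j =>
      have := leastIdx_nonneg rest w j hr
      simp [hw]
      omega

theorem least_cons_succ (items : List String) (rest : List (List String)) (w : String) (j : Nat) :
    (leastIdx (items :: rest) w == some ((j : Int) + 1))
      = ((leastIdx rest w == some (j : Int)) && !decide (w ∈ items)) := by
  by_cases hw : w ∈ items
  · simp only [leastIdx, if_pos hw]
    simp [hw]
    try omega
  · simp only [leastIdx, if_neg hw]
    cases hr : leastIdx rest w with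
    | none => simp [hw]
    | some k => simp [hw]; try omega

theorem specBuckets_eq_range (pw : List (List String)) (wl : List String) :
    specBuckets pw wl
      = (List.range pw.length).map (fun (i : Nat) =>
          (wl.filter (fun w => leastIdx pw w == some (i : Int))).map
            (fun w => (w, (pw.map (fun items => PySem.Str.join "_" items)).getD i ""))) := by
  induction pw generalizing wl with
  | nil => simp [specBuckets]
  | cons items rest ih =>
    rw [specBuckets, List.length_cons, List.range_succ_eq_map, List.map_cons, ih, List.map_map]
    congr 1
    · congr 1
      apply List.filter_congr
      intro w _
      rw [show ((0 : Nat) : Int) = (0 : Int) by norm_num]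
      exact (least_cons_zero items rest w).symm
    · apply List.map_congr_left
      intro j hj
      simp only [Function.comp_apply]
      congr 1
      rw [List.filter_filter]
      apply List.filter_congr
      intro w _
      rw [show ((Nat.succ j : Nat) : Int) = (j : Int) + 1 by omega]
      rw [least_cons_succ]

theorem leastIdx_lt (pw : List (List String)) (w : String) (i : Int)
    (h : leastIdx pw w = some i) : i < pw.length := by
  induction pw generalizing i with
  | nil => simp [leastIdx] at h
  | cons items rest ih =>
    simp only [leastIdx] at h
    split at h
    · simp at h ⊢; omega
    · cases hr : leastIdx rest w with
      | none => rw [hr] at h; simp at h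
      | some j => rw [hr] at h; simp at h; have := ih j hr; simp; omega

theorem mapIdx_map_const_nil {α β γ : Type} (pl : List α)
    (f : Nat → List β → γ) :
    (pl.map (fun _ => ([] : List β))).mapIdx f
      = (List.range pl.length).map (fun i => f i []) := by
  apply List.ext_getElem
  · simp
  · intro j hj1 hj2
    simp [List.getElem_mapIdx]

-- ===== VERDICT (by name: the statement is the Claim_ definition above) =====
theorem WordtoPhraseMatch_spec : Claim_equal_WordtoPhraseMatch := by
  intro wl pl D _ _
  unfold Spec_WordtoPhraseMatch WordtoPhraseMatch WordtoPhraseMatch_alt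
  obtain ⟨hA1, hA2⟩ := outerLoop (pl.map (pvSplit D)) wl 0 []
  have hrange : ∀ w i, (pvOwnerJoined pl D).1.get? w = some i →
      0 ≤ i ∧ i < (pl.map (fun _ => ([] : List (String × String)))).length := by
    intro w i h
    rw [owner_spec] at h
    refine ⟨leastIdx_nonneg _ w i h, ?_⟩
    have := leastIdx_lt _ w i h
    simpa using this
  have hbuck := bucketLoop (pvOwnerJoined pl D).1 (pvOwnerJoined pl D).2 wl
      (pl.map (fun _ => [])) hrange
  rw [mapIdx_map_const_nil] at hbuck
  have hbuckets : wl.foldl (pvBucketStep (pvOwnerJoined pl D).1 (pvOwnerJoined pl D).2)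
      (pl.map (fun _ => [])) = specBuckets (pl.map (pvSplit D)) wl := by
    rw [hbuck, specBuckets_eq_range]
    rw [show (pl.map (pvSplit D)).length = pl.length by simp]
    apply List.map_congr_left
    intro j hj
    simp only [List.nil_append]
    congr 1
    · funext x
      rw [joined_spec, PySem.List.pyGetD_natCast]
    · apply List.filter_congr
      intro x _
      rw [owner_spec]
  simp only [hA1, hA2, hbuckets, List.nil_append, zero_add]
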